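-- pv_equiv track=rewrite | github.com/deephyper/scalable-bo | experiments/plot.py | count_better
-- ===== SOURCE A (Python) =====
-- MODE = "max"
--
-- def count_better(values, baseline_perf):
--
--     count = 0
--     res = []
--
--     if MODE == "max":
--         for value in values:
--             if value > baseline_perf:
--                 count += 1
--             res.append(count)
--     else:
--         for value in values:
--             if value < baseline_perf:
--                 count += 1
--             res.append(count)
--
--     return res
-- ===== SOURCE B (Python) =====
-- MODE = "max"
--
-- def count_better(values, baseline_perf):
--     # Compute the grand total first, then fill the result back-to-front,
--     # subtracting each element's flag while walking the list in reverse.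
--     if MODE == "max":
--         total = sum(1 if v > baseline_perf else 0 for v in values)
--         rev = []
--         for v in reversed(values):
--             rev.append(total)
--             total -= 1 if v > baseline_perf else 0
--         rev.reverse()
--         return rev
--     else:
--         total = sum(1 if v < baseline_perf else 0 for v in values)
--         rev = []
--         for v in reversed(values):
--             rev.append(total)
--             total -= 1 if v < baseline_perf else 0
--         rev.reverse()
--         return rev
-- ===== Notes on version B (the rewrite author's own statement) =====
-- stated objective: alternative
-- what changed: Instead of an imperative running counter appended left-to-right, B computes the grand total of comparison flags once and then builds the cumulative-count list back-to-front by subtracting each element's flag while walking the list in reverse.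
import Mathlib
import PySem

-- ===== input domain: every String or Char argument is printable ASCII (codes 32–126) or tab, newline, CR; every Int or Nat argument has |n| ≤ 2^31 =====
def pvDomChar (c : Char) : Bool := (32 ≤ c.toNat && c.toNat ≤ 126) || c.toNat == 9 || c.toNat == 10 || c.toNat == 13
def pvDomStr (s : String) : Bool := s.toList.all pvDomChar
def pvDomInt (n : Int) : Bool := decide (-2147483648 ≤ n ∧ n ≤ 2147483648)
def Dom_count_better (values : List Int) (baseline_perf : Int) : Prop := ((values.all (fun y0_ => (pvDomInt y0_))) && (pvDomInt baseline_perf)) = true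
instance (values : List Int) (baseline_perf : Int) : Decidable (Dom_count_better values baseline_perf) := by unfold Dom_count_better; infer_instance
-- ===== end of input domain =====

-- B replaces A's left-to-right running counter by a total-then-backward-subtraction pass
-- (alternative algorithm, same asymptotic cost).

-- ===== PORT A =====
def pvMODE : String := "max"

def count_better (values : List Int) (baseline_perf : Int) : List Int :=
  if pvMODE == "max" then
    (values.foldl (fun (st : Int × List Int) value =>
      let count := if value > baseline_perf then st.1 + 1 else st.1
      (count, st.2 ++ [count])) (0, [])).2
  else
    (values.foldl (fun (st : Int × List Int) value =>
      let count := if value < baseline_perf then st.1 + 1 else st.1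
      (count, st.2 ++ [count])) (0, [])).2

-- ===== PORT B =====
def count_better_alt (values : List Int) (baseline_perf : Int) : List Int :=
  if pvMODE == "max" then
    let total : Int := (values.map (fun v => if v > baseline_perf then (1:Int) else 0)).sum
    let st := values.reverse.foldl (fun (st : Int × List Int) v =>
      (st.1 - (if v > baseline_perf then 1 else 0), st.2 ++ [st.1])) (total, [])
    st.2.reverse
  else
    let total : Int := (values.map (fun v => if v < baseline_perf then (1:Int) else 0)).sum
    let st := values.reverse.foldl (fun (st : Int × List Int) v =>
      (st.1 - (if v < baseline_perf then 1 else 0), st.2 ++ [st.1])) (total, [])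
    st.2.reverse

-- ===== PRECONDITION & SPEC =====
def Spec_count_better (values : List Int) (baseline_perf : Int) (out : List Int) : Prop := out = count_better_alt values baseline_perf
instance (values : List Int) (baseline_perf : Int) (out : List Int) : Decidable (Spec_count_better values baseline_perf out) := by unfold Spec_count_better; infer_instance

-- ===== CLAIM (what is proved, stated in full; the proofs are below) =====
def Claim_equal_count_better : Prop := ∀ (values : List Int) (baseline_perf : Int), Dom_count_better values baseline_perf → Spec_count_better values baseline_perf (count_better values baseline_perf)

-- ===== LEMMAS AND PROOFS =====

-- flag of one element (proof-only abbreviation)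
def pvFlag (b v : Int) : Int := if v > b then 1 else 0

-- left-to-right cumulative counts, recursively (proof-only characterisation)
def pvScan (b : Int) : List Int → List Int
  | [] => []
  | v :: vs => pvFlag b v :: (pvScan b vs).map (fun c => pvFlag b v + c)

-- the descending sequence t, t - f w0, t - f w0 - f w1, … (proof-only)
def pvDiffs (b : Int) : Int → List Int → List Int
  | _, [] => []
  | t, w :: ws => t :: pvDiffs b (t - pvFlag b w) ws

theorem count_better_fold_inv (b : Int) (vs : List Int) :
    ∀ (c : Int) (acc : List Int),
    (vs.foldl (fun (st : Int × List Int) value =>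
      let count := if value > b then st.1 + 1 else st.1
      (count, st.2 ++ [count])) (c, acc)).2
    = acc ++ (pvScan b vs).map (fun x => c + x) := by
  induction vs with
  | nil => intro c acc; simp [pvScan]
  | cons v vs ih =>
    intro c acc
    simp only [List.foldl, pvScan, pvFlag]
    by_cases h : v > b
    · simp [h, ih, List.map_map]
    · simp [h, ih]

theorem alt_fold_inv (b : Int) (ws : List Int) :
    ∀ (t : Int) (acc : List Int),
    (ws.foldl (fun (st : Int × List Int) v =>
      (st.1 - (if v > b then 1 else 0), st.2 ++ [st.1])) (t, acc)).2
    = acc ++ pvDiffs b t ws := by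
  induction ws with
  | nil => intro t acc; simp [pvDiffs]
  | cons w ws ih =>
    intro t acc
    simp [List.foldl, pvDiffs, ih, pvFlag]

theorem pvDiffs_append (b : Int) (xs ys : List Int) :
    ∀ (t : Int),
    pvDiffs b t (xs ++ ys)
    = pvDiffs b t xs ++ pvDiffs b (t - (xs.map (pvFlag b)).sum) ys := by
  induction xs with
  | nil => intro t; simp [pvDiffs]
  | cons x xs ih =>
    intro t
    simp only [List.cons_append, pvDiffs, ih, List.map_cons, List.sum_cons, sub_sub]

theorem pvFlag_sum_reverse (b : Int) (vs : List Int) :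
    (vs.reverse.map (pvFlag b)).sum = (vs.map (pvFlag b)).sum := by
  rw [List.map_reverse, List.sum_reverse]

theorem pvDiffs_reverse_eq_scan (b : Int) (vs : List Int) :
    ∀ (c : Int),
    (pvDiffs b (c + (vs.map (pvFlag b)).sum) vs.reverse).reverse
    = (pvScan b vs).map (fun x => c + x) := by
  induction vs with
  | nil => intro c; simp [pvDiffs, pvScan]
  | cons v vs ih =>
    intro c
    have hrev : (v :: vs).reverse = vs.reverse ++ [v] := by simp
    rw [hrev, pvDiffs_append, pvFlag_sum_reverse]
    have h1 : pvDiffs b (c + (List.map (pvFlag b) (v :: vs)).sum - (vs.map (pvFlag b)).sum) [v]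
        = [c + pvFlag b v] := by
      simp [pvDiffs, List.sum_cons]
      ring
    have h2 : c + (List.map (pvFlag b) (v :: vs)).sum
        = (c + pvFlag b v) + (vs.map (pvFlag b)).sum := by
      simp [List.sum_cons]; ring
    rw [h1, h2, List.reverse_append, ih (c + pvFlag b v)]
    simp [pvScan, List.map_map]

-- ===== VERDICT (by name: the statement is the Claim_ definition above) =====
theorem count_better_spec : Claim_equal_count_better := by
  intro values baseline_perf _
  unfold Spec_count_better count_better count_better_alt
  simp only [pvMODE, beq_self_eq_true, if_true]
  rw [count_better_fold_inv, alt_fold_inv]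
  rw [show (fun v => if v > baseline_perf then (1:Int) else 0) = pvFlag baseline_perf from rfl]
  simp only [List.nil_append]
  have := pvDiffs_reverse_eq_scan baseline_perf values 0
  simp only [zero_add] at this ⊢
  exact this.symm
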